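-- pv_equiv track=rewrite | github.com/OmerFarukTekgozoglu/Hackerrank-Solution | ArrayManipulation.py | arrayManipulation_solutionOne
-- ===== SOURCE A (Python) =====
-- def arrayManipulation_solutionOne(n, queries):
--     # Write your code here
--     initialDict = {item:0 for item in range(1,n+1)}
--     for que in queries:
--         low,high = que[:-1][0],que[:-1][1]
--         val = que[-1]
--         tempDict = {_:val for _ in range(low,high+1)}
--         for k,v in tempDict.items():
--             initialDict[k] += tempDict[k]
--     idxOfMax = max(initialDict,key=initialDict.get)
--     return initialDict[idxOfMax]
-- ===== SOURCE B (Python) =====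
-- def arrayManipulation_solutionOne(n, queries):
--     # Difference array: O(n + q) instead of touching every cell of each range.
--     diff = [0] * (n + 2)
--     for q in queries:
--         low, high, val = q[0], q[1], q[-1]
--         if low <= high:
--             diff[low] += val
--             diff[high + 1] -= val
--     best = None
--     cur = 0
--     for i in range(1, n + 1):
--         cur += diff[i]
--         if best is None or cur > best:
--             best = cur
--     return best
-- ===== Notes on version B (the rewrite author's own statement) =====
-- stated objective: faster
-- what changed: A builds a dict over all of 1..n and, for every query, increments every cell of the query's range (via a second per-query dict) before scanning for the max; B only marks +val at low and -val at high+1 in a difference array and takes the running maximum of one prefix-sum sweep.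
import Mathlib
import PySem

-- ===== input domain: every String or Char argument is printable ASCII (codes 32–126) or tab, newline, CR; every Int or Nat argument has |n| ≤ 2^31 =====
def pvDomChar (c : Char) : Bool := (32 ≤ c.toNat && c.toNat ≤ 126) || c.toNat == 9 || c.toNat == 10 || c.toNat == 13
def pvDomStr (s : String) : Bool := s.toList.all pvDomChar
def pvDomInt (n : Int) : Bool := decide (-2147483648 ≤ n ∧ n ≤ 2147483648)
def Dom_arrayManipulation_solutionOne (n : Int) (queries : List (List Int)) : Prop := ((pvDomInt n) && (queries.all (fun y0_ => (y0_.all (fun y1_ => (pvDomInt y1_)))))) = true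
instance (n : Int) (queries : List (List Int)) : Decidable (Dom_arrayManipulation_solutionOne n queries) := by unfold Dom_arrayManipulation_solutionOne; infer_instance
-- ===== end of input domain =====

-- B replaces A's per-cell range updates (dict touched on every index of every query range)
-- by a difference array with a single prefix-sum/max sweep: O(n + q) instead of O(n + Σ range sizes).

-- ===== PORT A =====
-- body of A's outer 'for que in queries' loop
def aStep (d : PySem.Dict Int Int) (que : List Int) : PySem.Dict Int Int :=
  let pre := PySem.List.slice que none (some (-1))          -- que[:-1]
  let low := (PySem.List.pyGet? pre 0).getD 0
  let high := (PySem.List.pyGet? pre 1).getD 0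
  let val := (PySem.List.pyGet? que (-1)).getD 0
  let tempDict : PySem.Dict Int Int :=
    (PySem.List.pyRange low (high + 1) 1).foldl (fun t x => t.insert x val) PySem.Dict.empty
  tempDict.items.foldl (fun d kv => d.modify kv.1 0 (fun w => w + tempDict.getD kv.1 0)) d

def arrayManipulation_solutionOne (n : Int) (queries : List (List Int)) : Int :=
  let initialDict : PySem.Dict Int Int :=
    (PySem.List.pyRange 1 (n + 1) 1).foldl (fun d item => d.insert item 0) PySem.Dict.empty
  let finalDict := queries.foldl aStep initialDict
  let idxOfMax := (PySem.List.max? finalDict.keys (fun k => (finalDict.get? k).getD 0)).getD 0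
  (finalDict.get? idxOfMax).getD 0

-- ===== PORT B =====
-- body of B's 'for q in queries' loop (difference-array marks)
def bStep (diff : List Int) (q : List Int) : List Int :=
  let low := (PySem.List.pyGet? q 0).getD 0
  let high := (PySem.List.pyGet? q 1).getD 0
  let val := (PySem.List.pyGet? q (-1)).getD 0
  if low ≤ high then
    let d1 := PySem.List.pySetD diff low (PySem.List.pyGetD diff low 0 + val)
    PySem.List.pySetD d1 (high + 1) (PySem.List.pyGetD d1 (high + 1) 0 - val)
  else diff

-- body of B's prefix-sum/running-max sweep ('best' is Option: None until the first cell)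
def bScanStep (diff : List Int) (bc : Option Int × Int) (i : Int) : Option Int × Int :=
  let cur := bc.2 + PySem.List.pyGetD diff i 0
  (match bc.1 with
   | none => some cur
   | some b => if b < cur then some cur else some b, cur)

def arrayManipulation_solutionOne_alt (n : Int) (queries : List (List Int)) : Int :=
  let diff := queries.foldl bStep (List.replicate (n + 2).toNat 0)
  let r := (PySem.List.pyRange 1 (n + 1) 1).foldl (bScanStep diff) (none, 0)
  r.1.getD 0

-- ===== PRECONDITION & SPEC =====
-- Pre_ excludes exactly the inputs where A raises: n < 1 (max() on an empty dict → ValueError,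
-- or a KeyError first), a query of length < 3 (IndexError on que[:-1][1]), and a query whose
-- non-empty range [low, high] leaves 1..n (KeyError).
def Pre_arrayManipulation_solutionOne (n : Int) (queries : List (List Int)) : Prop :=
  1 ≤ n ∧ ∀ q ∈ queries, 3 ≤ q.length ∧
    ((PySem.List.pyGet? q 0).getD 0 ≤ (PySem.List.pyGet? q 1).getD 0 →
      1 ≤ (PySem.List.pyGet? q 0).getD 0 ∧ (PySem.List.pyGet? q 1).getD 0 ≤ n)
instance (n : Int) (queries : List (List Int)) : Decidable (Pre_arrayManipulation_solutionOne n queries) := by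
  unfold Pre_arrayManipulation_solutionOne; infer_instance

def pvWitness_arrayManipulation_solutionOne : Int × List (List Int) := (5, [[1, 3, 4], [2, 5, -2], [4, 3, 7]])

def Spec_arrayManipulation_solutionOne (n : Int) (queries : List (List Int)) (out : Int) : Prop := out = arrayManipulation_solutionOne_alt n queries
instance (n : Int) (queries : List (List Int)) (out : Int) : Decidable (Spec_arrayManipulation_solutionOne n queries out) := by unfold Spec_arrayManipulation_solutionOne; infer_instance

-- ===== CLAIM (what is proved, stated in full; the proofs are below) =====
def Claim_equal_arrayManipulation_solutionOne : Prop := ∀ (n : Int) (queries : List (List Int)), Dom_arrayManipulation_solutionOne n queries → Pre_arrayManipulation_solutionOne n queries → Spec_arrayManipulation_solutionOne n queries (arrayManipulation_solutionOne n queries)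

-- ===== LEMMAS AND PROOFS =====

-- the mathematical content shared by both proofs: contribution of one query to cell k,
-- total load of cell k, and prefix sums of the difference array
def contrib (q : List Int) (k : Int) : Int :=
  if (PySem.List.pyGet? q 0).getD 0 ≤ k ∧ k ≤ (PySem.List.pyGet? q 1).getD 0
  then (PySem.List.pyGet? q (-1)).getD 0 else 0

def S (qs : List (List Int)) (k : Int) : Int := (qs.map (fun q => contrib q k)).sum

def Qsum (diff : List Int) (i : Int) : Int :=
  ((PySem.List.pyRange 1 (i + 1) 1).map (fun j => PySem.List.pyGetD diff j 0)).sum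

def okq (n : Int) (q : List Int) : Prop :=
  3 ≤ q.length ∧
    ((PySem.List.pyGet? q 0).getD 0 ≤ (PySem.List.pyGet? q 1).getD 0 →
      1 ≤ (PySem.List.pyGet? q 0).getD 0 ∧ (PySem.List.pyGet? q 1).getD 0 ≤ n)

lemma S_cons (q : List Int) (qs : List (List Int)) (k : Int) : S (q :: qs) k = contrib q k + S qs k := by
  simp [S]

lemma pyGet?_one_cons (x y : Int) (l : List Int) : PySem.List.pyGet? (x :: y :: l) 1 = some y := by
  rw [show (1 : Int) = ((0 : Nat) : Int) + 1 by simp]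
  rw [PySem.List.pyGet?_cons_succ]
  simp

lemma sum_map_add_ite (l : List Int) (f : Int → Int) (p d : Int) (hnd : l.Nodup) :
    (l.map (fun j => f j + if j = p then d else 0)).sum
      = (l.map f).sum + (if p ∈ l then d else 0) := by
  induction l with
  | nil => simp
  | cons a t ih =>
    rw [List.nodup_cons] at hnd
    obtain ⟨ha, ht⟩ := hnd
    simp only [List.map_cons, List.sum_cons, List.mem_cons]
    rw [ih ht]
    by_cases hap : a = p
    · subst hap
      have hpt : a ∉ t := ha
      simp [hpt]
      ring
    · have : ¬ (p = a) := fun h => hap h.symm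
      simp [hap, this]
      split_ifs <;> ring

lemma getD_fold_modify (ks : List Int) (v : Int) (d : PySem.Dict Int Int) (k : Int) :
    ((ks.foldl (fun d j => d.modify j 0 (fun w => w + v)) d).getD k 0)
      = d.getD k 0 + v * (ks.count k : Int) := by
  induction ks generalizing d with
  | nil => simp
  | cons j t ih =>
    rw [List.foldl_cons, ih, PySem.Dict.getD_modify]
    by_cases h : k = j
    · subst h
      rw [if_pos rfl]
      have hcnt : (k :: t).count k = t.count k + 1 := by simp
      rw [hcnt]
      push_cast
      ring
    · rw [if_neg h]
      have hjk : ¬ j = k := fun hh => h hh.symm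
      have hcnt : (j :: t).count k = t.count k := by simp [hjk]
      rw [hcnt]

lemma set_update_subset (s xs : List Int) (h : ∀ x ∈ xs, x ∈ s) : PySem.Set.update s xs = s := by
  induction xs generalizing s with
  | nil => rfl
  | cons a t ih =>
    have ha : a ∈ s := h a (by simp)
    have hadd : PySem.Set.add s a = s := by
      simp [PySem.Set.add, PySem.Set.contains, ha]
    show (a :: t).foldl PySem.Set.add s = s
    rw [List.foldl_cons, hadd]
    exact ih s (fun x hx => h x (by simp [hx]))

-- tempDict of one query: fresh distinct keys, each bound to val
lemma tempD_items (low high val : Int) :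
    ((PySem.List.pyRange low (high + 1) 1).foldl (fun t x => t.insert x val)
        (PySem.Dict.empty : PySem.Dict Int Int)).items
      = (PySem.List.pyRange low (high + 1) 1).map (fun k => (k, val)) := by
  have := PySem.Dict.items_foldl_insert_fresh (l := PySem.List.pyRange low (high + 1) 1)
    (k := fun x => x) (v := fun _ => val) (d := (PySem.Dict.empty : PySem.Dict Int Int))
    (by intro a _; simp) (by simpa using PySem.List.nodup_pyRange_one low (high + 1))
  simpa using this

lemma tempD_getD (low high val j : Int) (hj : j ∈ PySem.List.pyRange low (high + 1) 1) :
    ((PySem.List.pyRange low (high + 1) 1).foldl (fun t x => t.insert x val)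
        (PySem.Dict.empty : PySem.Dict Int Int)).getD j 0 = val := by
  apply PySem.Dict.getD_of_mem_items
  · rw [tempD_items]
    exact List.mem_map_of_mem hj
  · exact PySem.Dict.nodup_keys_foldl_insert _ _ _ (by simp)

-- A's one-query step: adds contrib q to every cell
lemma A_step (n : Int) (q : List Int) (d : PySem.Dict Int Int) (g : Int → Int)
    (hok : okq n q)
    (hkeys : d.keys = PySem.List.pyRange 1 (n + 1) 1)
    (hval : ∀ k ∈ PySem.List.pyRange 1 (n + 1) 1, d.getD k 0 = g k) :
    (aStep d q).keys = PySem.List.pyRange 1 (n + 1) 1 ∧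
      ∀ k ∈ PySem.List.pyRange 1 (n + 1) 1, (aStep d q).getD k 0 = g k + contrib q k := by
  obtain ⟨hq3, hqr⟩ := hok
  rcases q with _ | ⟨a, q⟩; · simp at hq3
  rcases q with _ | ⟨b, q⟩; · simp at hq3
  rcases q with _ | ⟨c, t⟩; · simp at hq3
  -- the values A reads from the query
  set val := (PySem.List.pyGet? (a :: b :: c :: t) (-1)).getD 0 with hvaldef
  have hget0 : (PySem.List.pyGet? (a :: b :: c :: t) 0).getD 0 = a := by
    simp [PySem.List.pyGet?_zero_cons]
  have hget1 : (PySem.List.pyGet? (a :: b :: c :: t) 1).getD 0 = b := by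
    simp [pyGet?_one_cons]
  have hdrop : (a :: b :: c :: t).dropLast = a :: b :: (c :: t).dropLast := by
    simp
  have hstep : aStep d (a :: b :: c :: t)
      = ((PySem.List.pyRange a (b + 1) 1).foldl (fun t x => t.insert x val)
          (PySem.Dict.empty : PySem.Dict Int Int)).items.foldl
          (fun d kv => d.modify kv.1 0 (fun w => w +
            ((PySem.List.pyRange a (b + 1) 1).foldl (fun t x => t.insert x val)
              (PySem.Dict.empty : PySem.Dict Int Int)).getD kv.1 0)) d := by
    simp only [aStep, PySem.List.slice_to_neg_one, hdrop, PySem.List.pyGet?_zero_cons,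
      pyGet?_one_cons, Option.getD_some]
    simp only [hvaldef]
  have hcontrib : ∀ k, contrib (a :: b :: c :: t) k = if a ≤ k ∧ k ≤ b then val else 0 := by
    intro k
    simp only [contrib, hget0, hget1, hvaldef]
  have hqr' : a ≤ b → 1 ≤ a ∧ b ≤ n := by
    intro hab
    have := hqr (by rw [hget0, hget1]; exact hab)
    rw [hget0, hget1] at this
    exact this
  have hsub : ∀ j ∈ PySem.List.pyRange a (b + 1) 1, j ∈ PySem.List.pyRange 1 (n + 1) 1 := by
    intro j hj
    rw [PySem.List.mem_pyRange_one] at hj ⊢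
    have := hqr' (by omega)
    omega
  rw [hstep, tempD_items, List.foldl_map]
  have hcongr := PySem.List.foldl_congr_mem (PySem.List.pyRange a (b + 1) 1)
    (fun (x : PySem.Dict Int Int) (y : Int) => x.modify (y, val).1 0 (fun w =>
      w + ((PySem.List.pyRange a (b + 1) 1).foldl (fun t x => t.insert x val)
        (PySem.Dict.empty : PySem.Dict Int Int)).getD (y, val).1 0))
    (fun (x : PySem.Dict Int Int) (y : Int) => x.modify y 0 (fun w => w + val)) d
    (by intro acc x hx
        show PySem.Dict.modify acc x 0 _ = PySem.Dict.modify acc x 0 _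
        rw [tempD_getD a b val x hx])
  rw [hcongr]
  constructor
  · rw [PySem.Dict.keys_foldl_modify, hkeys]
    exact set_update_subset _ _ hsub
  · intro k hk
    rw [getD_fold_modify, hval k hk, hcontrib k]
    have hnd := PySem.List.nodup_pyRange_one a (b + 1)
    by_cases hmem : k ∈ PySem.List.pyRange a (b + 1) 1
    · have h1 : (PySem.List.pyRange a (b + 1) 1).count k = 1 :=
        List.count_eq_one_of_mem hnd hmem
      rw [PySem.List.mem_pyRange_one] at hmem
      have : a ≤ k ∧ k ≤ b := by omega
      simp [h1, this]
    · have h0 : (PySem.List.pyRange a (b + 1) 1).count k = 0 :=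
        List.count_eq_zero_of_not_mem hmem
      rw [PySem.List.mem_pyRange_one] at hmem
      have : ¬ (a ≤ k ∧ k ≤ b) := by omega
      simp [h0, this]

lemma A_fold (n : Int) (qs : List (List Int)) (d : PySem.Dict Int Int) (g : Int → Int)
    (hok : ∀ q ∈ qs, okq n q)
    (hkeys : d.keys = PySem.List.pyRange 1 (n + 1) 1)
    (hval : ∀ k ∈ PySem.List.pyRange 1 (n + 1) 1, d.getD k 0 = g k) :
    (qs.foldl aStep d).keys = PySem.List.pyRange 1 (n + 1) 1 ∧
      ∀ k ∈ PySem.List.pyRange 1 (n + 1) 1, (qs.foldl aStep d).getD k 0 = g k + S qs k := by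
  induction qs generalizing d g with
  | nil =>
    simp only [List.foldl_nil]
    refine ⟨hkeys, fun k hk => ?_⟩
    rw [hval k hk]
    simp [S]
  | cons q t ih =>
    obtain ⟨hk1, hv1⟩ := A_step n q d g (hok q (by simp)) hkeys hval
    obtain ⟨hk2, hv2⟩ := ih (aStep d q) (fun k => g k + contrib q k) (fun q hq => hok q (List.mem_cons_of_mem _ hq)) hk1 hv1
    refine ⟨hk2, fun k hk => ?_⟩
    rw [List.foldl_cons] at *
    rw [hv2 k hk, S_cons]
    ring

lemma A_init (n : Int) :
    ((PySem.List.pyRange 1 (n + 1) 1).foldl (fun d item => d.insert item 0)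
        (PySem.Dict.empty : PySem.Dict Int Int)).keys
        = PySem.List.pyRange 1 (n + 1) 1 ∧
      ∀ k ∈ PySem.List.pyRange 1 (n + 1) 1,
        ((PySem.List.pyRange 1 (n + 1) 1).foldl (fun d item => d.insert item 0)
          (PySem.Dict.empty : PySem.Dict Int Int)).getD k 0 = 0 := by
  have hitems : ((PySem.List.pyRange 1 (n + 1) 1).foldl (fun d item => d.insert item 0)
        (PySem.Dict.empty : PySem.Dict Int Int)).items
      = (PySem.List.pyRange 1 (n + 1) 1).map (fun k => (k, (0 : Int))) := by
    simpa using PySem.Dict.items_foldl_insert_fresh (l := PySem.List.pyRange 1 (n + 1) 1)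
      (k := fun x => x) (v := fun _ => (0 : Int)) (d := (PySem.Dict.empty : PySem.Dict Int Int))
      (by intro a _; simp) (by simpa using PySem.List.nodup_pyRange_one 1 (n + 1))
  constructor
  · have hkeq : ((PySem.List.pyRange 1 (n + 1) 1).foldl (fun d item => d.insert item 0)
        (PySem.Dict.empty : PySem.Dict Int Int)).keys
        = (((PySem.List.pyRange 1 (n + 1) 1).foldl (fun d item => d.insert item 0)
          (PySem.Dict.empty : PySem.Dict Int Int)).items).map Prod.fst := rfl
    rw [hkeq, hitems, List.map_map]
    simp [Function.comp_def]
  · intro k hk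
    apply PySem.Dict.getD_of_mem_items
    · rw [hitems]
      exact List.mem_map_of_mem hk
    · exact PySem.Dict.nodup_keys_foldl_insert _ _ _ (by simp)

-- A's result is the max of S over 1..n (attained and dominating)
lemma A_char (n : Int) (qs : List (List Int)) (hn : 1 ≤ n) (hok : ∀ q ∈ qs, okq n q) :
    ∃ m ∈ PySem.List.pyRange 1 (n + 1) 1,
      arrayManipulation_solutionOne n qs = S qs m ∧
      ∀ y ∈ PySem.List.pyRange 1 (n + 1) 1, S qs y ≤ S qs m := by
  obtain ⟨hik, hiv⟩ := A_init n
  obtain ⟨hfk, hfv⟩ := A_fold n qs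
    ((PySem.List.pyRange 1 (n + 1) 1).foldl (fun d item => d.insert item 0)
      (PySem.Dict.empty : PySem.Dict Int Int))
    (fun _ => 0) hok hik hiv
  set d := qs.foldl aStep
    ((PySem.List.pyRange 1 (n + 1) 1).foldl (fun d item => d.insert item 0)
      (PySem.Dict.empty : PySem.Dict Int Int))
    with hd
  have hgv : ∀ k ∈ PySem.List.pyRange 1 (n + 1) 1, d.getD k 0 = S qs k := by
    intro k hk
    rw [hfv k hk]
    ring
  have hres : arrayManipulation_solutionOne n qs
      = (d.get? ((PySem.List.max? d.keys (fun k => (d.get? k).getD 0)).getD 0)).getD 0 := rfl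
  have h1R : (1 : Int) ∈ PySem.List.pyRange 1 (n + 1) 1 := by
    rw [PySem.List.mem_pyRange_one]; omega
  have hne : d.keys ≠ [] := by
    rw [hfk]
    intro h
    rw [h] at h1R
    exact (List.not_mem_nil) h1R
  obtain ⟨m, hm⟩ : ∃ m, PySem.List.max? d.keys (fun k => (d.get? k).getD 0) = some m := by
    cases hmax : PySem.List.max? d.keys (fun k => (d.get? k).getD 0) with
    | none => exact absurd ((PySem.List.max?_eq_none_iff _ _).mp hmax) hne
    | some m => exact ⟨m, rfl⟩
  have hmemR : m ∈ PySem.List.pyRange 1 (n + 1) 1 := by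
    rw [← hfk]; exact PySem.List.max?_mem hm
  have hkey : ∀ k ∈ PySem.List.pyRange 1 (n + 1) 1, (d.get? k).getD 0 = S qs k := by
    intro k hk
    rw [← PySem.Dict.getD_eq_get?_getD]
    exact hgv k hk
  refine ⟨m, hmemR, ?_, ?_⟩
  · rw [hres, hm, Option.getD_some, ← PySem.Dict.getD_eq_get?_getD]
    exact hgv m hmemR
  · intro y hy
    have := PySem.List.max?_isMax hm y (by rw [hfk]; exact hy)
    rwa [hkey y hy, hkey m hmemR] at this

-- B side
lemma pyGetD_oob (xs : List Int) (j : Int) (hj : (xs.length : Int) ≤ j) :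
    PySem.List.pyGetD xs j 0 = 0 := by
  apply PySem.List.pyGetD_of_none
  apply (PySem.List.pyGet?_eq_none_iff _ _).mpr
  simp only [PySem.Raise.InRange]
  omega

lemma pyGetD_pySetD_int (xs : List Int) (p j v : Int) (hp0 : 0 ≤ p) (hplen : p < (xs.length : Int)) (hj0 : 0 ≤ j) :
    PySem.List.pyGetD (PySem.List.pySetD xs p v) j 0 = if j = p then v else PySem.List.pyGetD xs j 0 := by
  rw [PySem.List.pySetD_of_nonneg _ _ hp0]
  by_cases hj : j < (xs.length : Int)
  · rw [PySem.List.pyGetD_eq_getElem _ _ hj0 (by simpa using hj),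
        PySem.List.pyGetD_eq_getElem _ _ hj0 (by simpa using hj)]
    rw [List.getElem_set]
    by_cases h : j = p
    · rw [if_pos (by omega), if_pos h]
    · rw [if_neg (by omega), if_neg h]
  · have hj' : (xs.length : Int) ≤ j := by omega
    have h1 : PySem.List.pyGetD (xs.set p.toNat v) j 0 = 0 := by
      apply pyGetD_oob
      simpa using hj'
    have hne : ¬ (j = p) := by omega
    rw [h1, pyGetD_oob xs j hj', if_neg hne]

lemma Qsum_set (diff : List Int) (p d i : Int) (hp0 : 0 ≤ p) (hplen : p < (diff.length : Int)) :
    Qsum (PySem.List.pySetD diff p (PySem.List.pyGetD diff p 0 + d)) i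
      = Qsum diff i + (if 1 ≤ p ∧ p ≤ i then d else 0) := by
  unfold Qsum
  have hcong : ∀ j ∈ PySem.List.pyRange 1 (i + 1) 1,
      PySem.List.pyGetD (PySem.List.pySetD diff p (PySem.List.pyGetD diff p 0 + d)) j 0
        = PySem.List.pyGetD diff j 0 + if j = p then d else 0 := by
    intro j hj
    rw [PySem.List.mem_pyRange_one] at hj
    rw [pyGetD_pySetD_int diff p j _ hp0 hplen (by omega)]
    by_cases h : j = p
    · subst h; simp
    · simp [h]
  rw [List.map_congr_left hcong, sum_map_add_ite _ _ _ _ (PySem.List.nodup_pyRange_one 1 (i + 1))]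
  congr 1
  by_cases h : p ∈ PySem.List.pyRange 1 (i + 1) 1
  · have := PySem.List.mem_pyRange_one.mp h
    rw [if_pos h, if_pos (by omega)]
  · have := fun hc => h (PySem.List.mem_pyRange_one.mpr hc)
    rw [if_neg h, if_neg (by intro hc; exact this ⟨hc.1, by omega⟩)]

lemma B_step (n : Int) (q diff : List Int) (hok : okq n q) (hn : 1 ≤ n)
    (hlen : diff.length = (n + 2).toNat) :
    (bStep diff q).length = (n + 2).toNat ∧
      ∀ i, 1 ≤ i → i ≤ n → Qsum (bStep diff q) i = Qsum diff i + contrib q i := by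
  obtain ⟨hq3, hqr⟩ := hok
  set low := (PySem.List.pyGet? q 0).getD 0 with hlow
  set high := (PySem.List.pyGet? q 1).getD 0 with hhigh
  set val := (PySem.List.pyGet? q (-1)).getD 0 with hval
  have hcontrib : ∀ i, contrib q i = if low ≤ i ∧ i ≤ high then val else 0 := fun i => rfl
  by_cases hlh : low ≤ high
  · obtain ⟨h1l, hhn⟩ := hqr hlh
    have hlenInt : (diff.length : Int) = n + 2 := by
      rw [hlen]; omega
    have hstep : bStep diff q
        = PySem.List.pySetD (PySem.List.pySetD diff low (PySem.List.pyGetD diff low 0 + val))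
            (high + 1)
            (PySem.List.pyGetD (PySem.List.pySetD diff low (PySem.List.pyGetD diff low 0 + val)) (high + 1) 0 - val) := by
      simp only [bStep, ← hlow, ← hhigh, ← hval, if_pos hlh]
    set d1 := PySem.List.pySetD diff low (PySem.List.pyGetD diff low 0 + val) with hd1
    have hlen1 : d1.length = diff.length := by
      rw [hd1]; exact PySem.List.length_pySetD _ _ _
    constructor
    · rw [hstep, PySem.List.length_pySetD, hlen1, hlen]
    · intro i h1i hin
      rw [hstep]
      have hq1 : Qsum d1 i = Qsum diff i + (if 1 ≤ low ∧ low ≤ i then val else 0) :=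
        Qsum_set diff low val i (by omega) (by omega)
      have hq2 : Qsum (PySem.List.pySetD d1 (high + 1) (PySem.List.pyGetD d1 (high + 1) 0 - val)) i
          = Qsum d1 i + (if 1 ≤ high + 1 ∧ high + 1 ≤ i then -val else 0) := by
        have := Qsum_set d1 (high + 1) (-val) i (by omega) (by rw [hlen1]; omega)
        rwa [show PySem.List.pyGetD d1 (high + 1) 0 + -val
            = PySem.List.pyGetD d1 (high + 1) 0 - val by ring] at this
      rw [hq2, hq1, hcontrib i]
      split_ifs <;> omega
  · have hstep : bStep diff q = diff := by
      simp only [bStep, ← hlow, ← hhigh, ← hval, if_neg hlh]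
    rw [hstep]
    refine ⟨hlen, fun i _ _ => ?_⟩
    rw [hcontrib i, if_neg (by omega)]
    ring

lemma B_fold (n : Int) (qs : List (List Int)) (diff : List Int) (hn : 1 ≤ n)
    (hok : ∀ q ∈ qs, okq n q) (hlen : diff.length = (n + 2).toNat) :
    (qs.foldl bStep diff).length = (n + 2).toNat ∧
      ∀ i, 1 ≤ i → i ≤ n → Qsum (qs.foldl bStep diff) i = Qsum diff i + S qs i := by
  induction qs generalizing diff with
  | nil => exact ⟨hlen, fun i _ _ => by simp [S]⟩
  | cons q t ih =>
    obtain ⟨hl1, hv1⟩ := B_step n q diff (hok q (by simp)) hn hlen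
    obtain ⟨hl2, hv2⟩ := ih (bStep diff q) (fun q hq => hok q (List.mem_cons_of_mem _ hq)) hl1
    refine ⟨hl2, fun i h1 h2 => ?_⟩
    rw [List.foldl_cons] at *
    rw [hv2 i h1 h2, hv1 i h1 h2, S_cons]
    ring

lemma Qsum_replicate (m : Nat) (i : Int) : Qsum (List.replicate m (0 : Int)) i = 0 := by
  unfold Qsum
  have hcong : ∀ j ∈ PySem.List.pyRange 1 (i + 1) 1,
      PySem.List.pyGetD (List.replicate m (0 : Int)) j 0 = 0 := by
    intro j _
    by_cases hr : PySem.Raise.InRange (List.replicate m (0 : Int)).length j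
    · exact List.eq_of_mem_replicate (PySem.List.pyGetD_mem _ 0 hr)
    · exact PySem.List.pyGetD_of_none _ _ _ ((PySem.List.pyGet?_eq_none_iff _ _).mpr hr)
  rw [List.map_congr_left hcong]
  simp

lemma Qsum_succ (diff : List Int) (i : Int) (hi : 1 ≤ i) :
    Qsum diff i = Qsum diff (i - 1) + PySem.List.pyGetD diff i 0 := by
  unfold Qsum
  rw [show i - 1 + 1 = i by ring]
  rw [PySem.List.pyRange_one_succ_right hi]
  simp

def pureStep (diff : List Int) (p : Int × Int) (i : Int) : Int × Int :=
  (max p.1 (p.2 + PySem.List.pyGetD diff i 0), p.2 + PySem.List.pyGetD diff i 0)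

lemma scan_some (diff : List Int) (l : List Int) (b c : Int) :
    l.foldl (bScanStep diff) (some b, c)
      = (some (l.foldl (pureStep diff) (b, c)).1, (l.foldl (pureStep diff) (b, c)).2) := by
  induction l generalizing b c with
  | nil => simp
  | cons i t ih =>
    have hstep : bScanStep diff (some b, c) i
        = (some (max b (c + PySem.List.pyGetD diff i 0)), c + PySem.List.pyGetD diff i 0) := by
      simp only [bScanStep]
      by_cases h : b < c + PySem.List.pyGetD diff i 0
      · simp [h, max_eq_right h.le]
      · simp [h, max_eq_left (not_lt.mp h)]
    have hpure : pureStep diff (b, c) i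
        = (max b (c + PySem.List.pyGetD diff i 0), c + PySem.List.pyGetD diff i 0) := rfl
    rw [List.foldl_cons, List.foldl_cons, hstep, ih, hpure]

lemma scan_pure (diff : List Int) (bnd : Int) (a : Int) (h1 : 1 ≤ a) (h : a ≤ bnd + 1) (b c : Int)
    (hc : c = Qsum diff (a - 1)) :
    (PySem.List.pyRange a (bnd + 1) 1).foldl (pureStep diff) (b, c)
      = ((PySem.List.pyRange a (bnd + 1) 1).foldl (fun acc i => max acc (Qsum diff i)) b,
         Qsum diff bnd) := by
  induction' hk : (bnd + 1 - a).toNat with k ih generalizing a b c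
  · have ha : a = bnd + 1 := by omega
    rw [PySem.List.pyRange_one_eq_nil (by omega)]
    simp only [List.foldl_nil]
    rw [hc, ha]
    norm_num
  · have ha : a < bnd + 1 := by omega
    rw [PySem.List.pyRange_one_cons ha, List.foldl_cons, List.foldl_cons]
    have hcur : c + PySem.List.pyGetD diff a 0 = Qsum diff a := by
      rw [hc, ← Qsum_succ diff a h1]
    have hpure : pureStep diff (b, c) a = (max b (Qsum diff a), Qsum diff a) := by
      simp only [pureStep, hcur]
    rw [hpure]
    exact ih (a + 1) (by omega) (by omega) (max b (Qsum diff a)) (Qsum diff a)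
      (by rw [show a + 1 - 1 = a by ring]) (by omega)

-- B's result is the max of S over 1..n (attained and dominating)
lemma B_char (n : Int) (qs : List (List Int)) (hn : 1 ≤ n) (hok : ∀ q ∈ qs, okq n q) :
    ∃ m ∈ PySem.List.pyRange 1 (n + 1) 1,
      arrayManipulation_solutionOne_alt n qs = S qs m ∧
      ∀ y ∈ PySem.List.pyRange 1 (n + 1) 1, S qs y ≤ S qs m := by
  set df := qs.foldl bStep (List.replicate (n + 2).toNat (0 : Int)) with hdf
  obtain ⟨hlen, hQ⟩ := B_fold n qs (List.replicate (n + 2).toNat (0 : Int)) hn hok (by simp)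
  have hQ' : ∀ i, 1 ≤ i → i ≤ n → Qsum df i = S qs i := by
    intro i h1 h2
    rw [hdf, hQ i h1 h2, Qsum_replicate]
    ring
  have hR : PySem.List.pyRange 1 (n + 1) 1 = 1 :: PySem.List.pyRange 2 (n + 1) 1 := by
    rw [PySem.List.pyRange_one_cons (by omega)]
    norm_num
  have hres : arrayManipulation_solutionOne_alt n qs
      = (((PySem.List.pyRange 1 (n + 1) 1).foldl (bScanStep df) (none, 0)).1).getD 0 := rfl
  have hQ0 : Qsum df 0 = 0 := by
    unfold Qsum
    rw [PySem.List.pyRange_one_eq_nil (by omega)]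
    simp
  have hfirst : bScanStep df ((none : Option Int), (0 : Int)) 1 = (some (Qsum df 1), Qsum df 1) := by
    have h1 : (0 : Int) + PySem.List.pyGetD df 1 0 = Qsum df 1 := by
      rw [Qsum_succ df 1 (by omega)]
      norm_num [hQ0]
    simp only [bScanStep, h1]
  rw [hR] at hres
  rw [List.foldl_cons, hfirst, scan_some,
      scan_pure df n 2 (by omega) (by omega) (Qsum df 1) (Qsum df 1) (by norm_num)] at hres
  set mB := (PySem.List.pyRange 2 (n + 1) 1).foldl (fun acc i => max acc (Qsum df i)) (Qsum df 1)
    with hmB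
  simp only [Option.getD_some] at hres
  have hbounds := PySem.List.le_foldl_max_int (PySem.List.pyRange 2 (n + 1) 1)
    (fun i => Qsum df i) (Qsum df 1)
  have hmBfold : mB = ((PySem.List.pyRange 2 (n + 1) 1).map (fun i => Qsum df i)).foldl max (Qsum df 1) := by
    rw [hmB, List.foldl_map]
  have hmem := PySem.List.foldl_max_mem ((PySem.List.pyRange 2 (n + 1) 1).map (fun i => Qsum df i)) (Qsum df 1)
  rw [← hmBfold] at hmem
  have hsub : ∀ j ∈ PySem.List.pyRange 2 (n + 1) 1, j ∈ PySem.List.pyRange 1 (n + 1) 1 ∧ 1 ≤ j ∧ j ≤ n := by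
    intro j hj
    rw [PySem.List.mem_pyRange_one] at hj
    exact ⟨PySem.List.mem_pyRange_one.mpr (by omega), by omega, by omega⟩
  obtain ⟨m, hmR, hmS⟩ : ∃ m ∈ PySem.List.pyRange 1 (n + 1) 1, mB = S qs m := by
    rcases hmem with h | h
    · exact ⟨1, PySem.List.mem_pyRange_one.mpr (by omega), by rw [h, hQ' 1 (by omega) hn]⟩
    · obtain ⟨j, hj, hjv⟩ := List.mem_map.mp h
      obtain ⟨hjR, hj1, hjn⟩ := hsub j hj
      exact ⟨j, hjR, by rw [← hjv, hQ' j hj1 hjn]⟩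
  refine ⟨m, hmR, by rw [hres, hmS], ?_⟩
  intro y hy
  rw [← hmS]
  rw [hR] at hy
  rcases List.mem_cons.mp hy with h | h
  · subst h
    rw [← hQ' 1 (by omega) hn]
    exact hbounds.1
  · obtain ⟨_, hy1, hyn⟩ := hsub y h
    rw [← hQ' y hy1 hyn]
    exact hbounds.2 y h

-- ===== VERDICT (by name: the statement is the Claim_ definition above) =====
theorem arrayManipulation_solutionOne_spec : Claim_equal_arrayManipulation_solutionOne := by
  intro n qs _hdom hpre
  obtain ⟨hn, hq⟩ := hpre
  obtain ⟨mA, hmA, hA, hAmax⟩ := A_char n qs hn hq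
  obtain ⟨mB, hmB, hB, hBmax⟩ := B_char n qs hn hq
  unfold Spec_arrayManipulation_solutionOne
  rw [hA, hB]
  exact le_antisymm (hBmax mA hmA) (hAmax mB hmB)
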